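-- pv_equiv track=rewrite | github.com/y24/wip | libs/DataSummarize.py | get_daily_filtered
-- ===== SOURCE A (Python) =====
-- from collections import defaultdict
--
-- def get_daily_filtered(data, filter=[str]):
--     result_count = defaultdict(int)
--
--     # 日付が空の行は削除
--     data = [row for row in data if len(row) > 2 and row[2] not in ("", None)]
--
--     # 結果がPassまたはFixedの行を日付ごとにカウント
--     for row in data:
--         result, _, date = row
--         if result in filter:
--             result_count[date] += 1
--
--     # 結果を返却
--     result = []
--     for date, count in sorted(result_count.items()):
--         result.append([date, count])
--     return result
-- ===== SOURCE B (Python) =====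
-- def get_daily_filtered(data, filter=[str]):
--     # collect the dates of matching rows (same row screen as A), sort them,
--     # then run-length encode the sorted list instead of counting into a dict
--     dates = []
--     for row in data:
--         if len(row) > 2 and row[2] not in ("", None):
--             result, _, date = row
--             if result in filter:
--                 dates.append(date)
--     dates.sort()
--     out = []
--     rest = dates
--     while rest:
--         d = rest[0]
--         k = 1
--         while k < len(rest) and rest[k] == d:
--             k += 1
--         out.append([d, k])
--         rest = rest[k:]
--     return out
-- ===== Notes on version B (the rewrite author's own statement) =====
-- stated objective: alternative
-- what changed: Replaces the defaultdict counter plus a post-sort of its items by collecting the matching rows' dates into a list, sorting it, and run-length encoding the sorted list (count equal neighbours).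
import Mathlib
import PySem

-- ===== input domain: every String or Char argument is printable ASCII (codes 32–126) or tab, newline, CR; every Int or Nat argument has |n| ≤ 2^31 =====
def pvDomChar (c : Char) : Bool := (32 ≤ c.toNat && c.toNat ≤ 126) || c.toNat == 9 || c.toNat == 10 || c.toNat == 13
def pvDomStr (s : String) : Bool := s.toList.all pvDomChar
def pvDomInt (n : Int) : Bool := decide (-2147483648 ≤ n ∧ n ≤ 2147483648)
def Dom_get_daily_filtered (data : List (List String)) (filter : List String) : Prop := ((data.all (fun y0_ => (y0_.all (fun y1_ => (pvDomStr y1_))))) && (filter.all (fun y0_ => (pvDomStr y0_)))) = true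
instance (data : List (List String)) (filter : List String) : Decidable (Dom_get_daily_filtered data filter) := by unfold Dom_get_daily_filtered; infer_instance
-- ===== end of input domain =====

-- B replaces A's defaultdict counter plus a post-sort of its items by collecting the
-- matching rows' dates, sorting that list and run-length encoding equal neighbours.

-- ===== PORT A =====
def get_daily_filtered (data : List (List String)) (filter : List String) : List (String × Int) :=
  -- data = [row for row in data if len(row) > 2 and row[2] not in ("", None)]
  let data2 := data.filter (fun row => if 2 < row.length then row.getD 2 "" != "" else false)
  -- for row in data2: result, _, date = row; if result in filter: result_count[date] += 1
  let result_count : PySem.Dict String Int := data2.foldl (fun d row =>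
      match row with
      | [result, _, date] => if result ∈ filter then d.insert date (d.getD date 0 + 1) else d
      | _ => d) PySem.Dict.empty
  -- for date, count in sorted(result_count.items()): result.append([date, count])
  (PySem.List.sorted2 result_count.items Prod.fst Prod.snd false).foldl (fun acc pr => acc ++ [pr]) []

-- ===== PORT B =====
-- while rest: d = rest[0]; k = 1 + (# leading elements of rest[1:] equal to d); out.append([d, k]); rest = rest[k:]
def pvRunsB : List String → List (String × Int)
  | [] => []
  | d :: tl =>
    (d, 1 + ((tl.takeWhile (· == d)).length : Int)) :: pvRunsB (tl.dropWhile (· == d))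
termination_by s => s.length
decreasing_by
  have := List.Sublist.length_le (List.dropWhile_sublist (p := (· == d)) (l := tl))
  simp; omega

def get_daily_filtered_alt (data : List (List String)) (filter : List String) : List (String × Int) :=
  -- for row in data: if len(row) > 2 and row[2] not in ("", None): result, _, date = row; if result in filter: dates.append(date)
  -- (the unpack 'result, _, date = row' is exact here: inside Pre_ every screened row has exactly 3 fields)
  let dates := data.foldl (fun acc row =>
      if (if 2 < row.length then row.getD 2 "" != "" else false) then
        (if row.getD 0 "" ∈ filter then acc ++ [row.getD 2 ""] else acc)
      else acc) []
  -- dates.sort(); then run-length encode the sorted list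
  pvRunsB (PySem.List.sorted dates (fun x => x) false)

-- ===== PRECONDITION & SPEC =====
-- Pre_ excludes inputs where a row passing A's screen (len > 2 and nonempty third field)
-- has length ≠ 3: both Pythons raise ValueError at 'result, _, date = row' there.
def Pre_get_daily_filtered (data : List (List String)) (filter : List String) : Prop :=
  ∀ row ∈ data, 2 < row.length → row.getD 2 "" ≠ "" → row.length = 3
instance (data : List (List String)) (filter : List String) : Decidable (Pre_get_daily_filtered data filter) := by unfold Pre_get_daily_filtered; infer_instance

def pvWitness_get_daily_filtered : List (List String) × List String :=
  ([["Pass", "t1", "2024-01-02"], ["Pass", "t2", "2024-01-01"], ["Fail", "t3", "2024-01-01"],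
    ["Pass", "t4", "2024-01-01"], ["Pass", "t5", ""]], ["Pass", "Fixed"])

def Spec_get_daily_filtered (data : List (List String)) (filter : List String) (out : List (String × Int)) : Prop := out = get_daily_filtered_alt data filter
instance (data : List (List String)) (filter : List String) (out : List (String × Int)) : Decidable (Spec_get_daily_filtered data filter out) := by unfold Spec_get_daily_filtered; infer_instance

-- ===== CLAIM (what is proved, stated in full; the proofs are below) =====
def Claim_equal_get_daily_filtered : Prop := ∀ (data : List (List String)) (filter : List String), Dom_get_daily_filtered data filter → Pre_get_daily_filtered data filter → Spec_get_daily_filtered data filter (get_daily_filtered data filter)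

-- ===== LEMMAS AND PROOFS =====

-- the dates of the matching rows, and the common canonical result value
def pvDates (rows : List (List String)) (f : List String) : List String :=
  (rows.filter (fun r => decide (r.getD 0 "" ∈ f))).map (fun r => r.getD 2 "")

def pvCanon (l : List String) : List (String × Int) :=
  (PySem.List.sorted (PySem.Set.ofList l) (fun x => x) false).map (fun d => (d, (l.count d : Int)))

-- A's counting loop over length-3 rows is the counter loop over the dates list
theorem pvFoldA_eq (f : List String) (rows : List (List String)) (h3 : ∀ r ∈ rows, r.length = 3)
    (d : PySem.Dict String Int) :
    rows.foldl (fun d row =>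
      match row with
      | [result, _, date] => if result ∈ f then d.insert date (d.getD date 0 + 1) else d
      | _ => d) d
    = (pvDates rows f).foldl (fun d x => d.insert x (d.getD x 0 + 1)) d := by
  induction rows generalizing d with
  | nil => simp [pvDates]
  | cons r t ih =>
    have hr : r.length = 3 := h3 r (by simp)
    obtain ⟨a, b, c, rfl⟩ : ∃ a b c, r = [a, b, c] := by
      match r, hr with | [a,b,c], _ => exact ⟨a,b,c,rfl⟩
    have ht : ∀ r ∈ t, r.length = 3 := fun r hrm => h3 r (by simp [hrm])
    simp only [List.foldl_cons]
    rw [ih ht]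
    by_cases hm : a ∈ f <;> simp [pvDates, hm]

theorem pvInsertBy_congr {α : Type} (b1 b2 : α → α → Bool) (x : α) (ys : List α)
    (h : ∀ y ∈ ys, b1 x y = b2 x y) :
    PySem.List.insertBy b1 x ys = PySem.List.insertBy b2 x ys := by
  induction ys with
  | nil => rfl
  | cons y t ih =>
    simp only [PySem.List.insertBy]
    rw [h y (by simp)]
    split
    · rfl
    · rw [ih (fun z hz => h z (by simp [hz]))]

theorem pvFoldl_insertBy_congr {α : Type} (b1 b2 : α → α → Bool) :
    ∀ (xs acc : List α), (∀ x ∈ xs, ∀ y, (y ∈ acc ∨ y ∈ xs) → b1 x y = b2 x y) →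
    xs.foldl (fun a x => PySem.List.insertBy b1 x a) acc
      = xs.foldl (fun a x => PySem.List.insertBy b2 x a) acc := by
  intro xs
  induction xs with
  | nil => intro acc h; rfl
  | cons x t ih =>
    intro acc h
    simp only [List.foldl_cons]
    rw [pvInsertBy_congr b1 b2 x acc (fun y hy => h x (by simp) y (Or.inl hy))]
    apply ih
    intro z hz y hy
    apply h z (by simp [hz])
    rcases hy with hy | hy
    · rcases (PySem.List.mem_insertBy _ _ _ _).mp hy with rfl | hy'
      · right; simp
      · left; exact hy'
    · right; simp [hy]

-- sorting pairs whose first components are pairwise distinct by the Python tuple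
-- order is sorting them by the first component
theorem pvSorted2_eq_sorted_fst (xs : List (String × Int)) (hnd : (xs.map Prod.fst).Nodup) :
    PySem.List.sorted2 xs Prod.fst Prod.snd false = PySem.List.sorted xs Prod.fst false := by
  unfold PySem.List.sorted2 PySem.List.sorted
  simp only [if_neg (by decide : ¬ (false = true))]
  apply pvFoldl_insertBy_congr
  intro x hx y hy
  simp only [List.not_mem_nil, false_or] at hx hy
  by_cases hxy : x.1 = y.1
  · have : x = y := List.inj_on_of_nodup_map hnd hx hy hxy
    subst this
    simp
  · rcases lt_trichotomy x.1 y.1 with hlt | heq | hgt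
    · simp [hlt]
    · exact absurd heq hxy
    · simp [hgt, not_lt_of_gt hgt]

-- A side: sorted items of the counter of l is the canonical value
theorem pvA_canon (l : List String) :
    PySem.List.sorted2 (PySem.Dict.counter l).items Prod.fst Prod.snd false = pvCanon l := by
  rw [PySem.Dict.items_counter]
  have hnd : (((PySem.Set.ofList l).map (fun k => (k, (l.count k : Int)))).map Prod.fst).Nodup := by
    simp only [List.map_map]
    have he : List.map (Prod.fst ∘ fun k => (k, (l.count k : Int))) (PySem.Set.ofList l)
        = PySem.Set.ofList l := List.map_id _
    rw [he]
    exact PySem.Set.nodup_ofList l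
  rw [pvSorted2_eq_sorted_fst _ hnd]
  apply PySem.List.sorted_eq_of_perm_of_pairwise_lt
  · exact List.Perm.map _ (PySem.List.sorted_perm _ _ _)
  · unfold pvCanon
    rw [List.pairwise_map]
    exact PySem.List.sorted_ofList_pairwise_lt (xs := l)

theorem pvFoldl_add_of_mem : ∀ (l s : List String), (∀ x ∈ l, x ∈ s) →
    l.foldl PySem.Set.add s = s := by
  intro l
  induction l with
  | nil => intro s _; rfl
  | cons x t ih =>
    intro s h
    have hx : x ∈ s := h x (by simp)
    have : PySem.Set.add s x = s := by simp [PySem.Set.add, PySem.Set.contains, hx]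
    simp only [List.foldl_cons, this]
    exact ih s (fun z hz => h z (by simp [hz]))

theorem pvFoldl_add_cons (d : String) : ∀ (l s : List String), d ∉ l →
    l.foldl PySem.Set.add (d :: s) = d :: l.foldl PySem.Set.add s := by
  intro l
  induction l with
  | nil => intro s _; rfl
  | cons x t ih =>
    intro s h
    have hxd : x ≠ d := fun he => h (by simp [he])
    have : PySem.Set.add (d :: s) x = d :: PySem.Set.add s x := by
      have hbd : (x == d) = false := by simpa using hxd
      simp only [PySem.Set.add, PySem.Set.contains, List.contains_cons, hbd,
        Bool.false_or]
      split <;> simp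
    simp only [List.foldl_cons, this]
    exact ih _ (fun hd => h (by simp [hd]))

theorem pvOfList_cons_split (d : String) (run tl' : List String)
    (hrun : ∀ x ∈ run, x = d) (hd : d ∉ tl') :
    PySem.Set.ofList (d :: (run ++ tl')) = d :: PySem.Set.ofList tl' := by
  rw [PySem.Set.ofList_eq_foldl, PySem.Set.ofList_eq_foldl]
  simp only [List.foldl_cons, List.foldl_append]
  have h1 : PySem.Set.add [] d = [d] := rfl
  have h2 : run.foldl PySem.Set.add [d] = [d] :=
    pvFoldl_add_of_mem run [d] (fun x hx => by simp [hrun x hx])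
  rw [h1, h2, pvFoldl_add_cons d tl' [] hd]

-- run-length encoding of a sorted list lists each distinct element with its multiplicity
theorem pvRunsB_eq (s : List String) (h : s.Pairwise (· ≤ ·)) :
    pvRunsB s = (PySem.Set.ofList s).map (fun d => (d, (s.count d : Int))) := by
  match s with
  | [] => simp [pvRunsB]
  | d :: tl =>
    have hle : ∀ x ∈ tl, d ≤ x := (List.pairwise_cons.mp h).1
    have htlpw : tl.Pairwise (· ≤ ·) := (List.pairwise_cons.mp h).2
    have hsplit : tl.takeWhile (· == d) ++ tl.dropWhile (· == d) = tl :=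
      List.takeWhile_append_dropWhile
    have hrun : ∀ x ∈ tl.takeWhile (· == d), x = d := fun x hx => by
      simpa using List.mem_takeWhile_imp hx
    have hsub : (tl.dropWhile (· == d)).Sublist tl := List.dropWhile_sublist _
    have htl'pw : (tl.dropWhile (· == d)).Pairwise (· ≤ ·) := htlpw.sublist hsub
    have hdn : d ∉ tl.dropWhile (· == d) := by
      cases he : tl.dropWhile (· == d) with
      | nil => simp
      | cons e r =>
        have hpe : (e == d) = false := by
          have := List.head?_dropWhile_not (· == d) tl
          rw [he] at this; simpa using this
        have hed : e ≠ d := by simpa using hpe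
        have hde : d < e := lt_of_le_of_ne (hle e (hsub.subset (he ▸ List.mem_cons_self))) (fun hc => hed hc.symm)
        intro hmem
        rcases List.mem_cons.mp hmem with rfl | hmem'
        · exact hed rfl
        · have her : e ≤ d := by
            have := (List.pairwise_cons.mp (he ▸ htl'pw)).1
            exact this d hmem'
          exact absurd (lt_of_lt_of_le hde her) (lt_irrefl d)
    have ih := pvRunsB_eq (tl.dropWhile (· == d)) htl'pw
    rw [pvRunsB, ih]
    have hcd : ((d :: tl).count d : Int) = 1 + ((tl.takeWhile (· == d)).length : Int) := by
      have h0 : (tl.dropWhile (· == d)).count d = 0 := List.count_eq_zero.mpr hdn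
      have h1 : (tl.takeWhile (· == d)).count d = (tl.takeWhile (· == d)).length :=
        List.count_eq_length.mpr (fun b hb => (hrun b hb).symm)
      have htw : tl.count d = (tl.takeWhile (· == d)).length := by
        conv_lhs => rw [← hsplit]
        rw [List.count_append, h0, h1]
        omega
      rw [List.count_cons_self, htw]
      push_cast
      omega
    have hset : PySem.Set.ofList (d :: tl) = d :: PySem.Set.ofList (tl.dropWhile (· == d)) := by
      conv_lhs => rw [← hsplit]
      exact pvOfList_cons_split d _ _ hrun hdn
    rw [hset, List.map_cons, hcd]
    congr 1
    apply List.map_congr_left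
    intro e he
    have he' : e ∈ tl.dropWhile (· == d) := (PySem.Set.mem_ofList _ _).mp he
    have hed : e ≠ d := fun hc => hdn (hc ▸ he')
    have hcnt : (d :: tl).count e = (tl.dropWhile (· == d)).count e := by
      have h0 : (tl.takeWhile (· == d)).count e = 0 :=
        List.count_eq_zero.mpr (fun hc => hed (hrun e hc))
      have htl : tl.count e = (tl.dropWhile (· == d)).count e := by
        conv_lhs => rw [← hsplit]
        rw [List.count_append, h0]
        omega
      rw [← htl, List.count_cons_of_ne (Ne.symm hed)]
    rw [hcnt]
termination_by s.length
decreasing_by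
  have := List.Sublist.length_le (List.dropWhile_sublist (p := (· == d)) (l := tl))
  simp; omega

theorem pvFoldl_add_exists_sublist : ∀ (l acc : List String),
    ∃ u, l.foldl PySem.Set.add acc = acc ++ u ∧ u.Sublist l := by
  intro l
  induction l with
  | nil => exact fun acc => ⟨[], by simp⟩
  | cons x t ih =>
    intro acc
    simp only [List.foldl_cons]
    by_cases hc : PySem.Set.contains acc x
    · have hx : x ∈ acc := by simpa [PySem.Set.contains] using hc
      have : PySem.Set.add acc x = acc := by simp [PySem.Set.add, PySem.Set.contains, hx]
      rw [this]
      obtain ⟨u, hu, hsub⟩ := ih acc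
      exact ⟨u, hu, hsub.cons _⟩
    · have hx : x ∉ acc := by simpa [PySem.Set.contains] using hc
      have : PySem.Set.add acc x = acc ++ [x] := by simp [PySem.Set.add, PySem.Set.contains, hx]
      rw [this]
      obtain ⟨u, hu, hsub⟩ := ih (acc ++ [x])
      exact ⟨x :: u, by simp [hu], hsub.cons₂ _⟩

theorem pvOfList_sublist (l : List String) : (PySem.Set.ofList l).Sublist l := by
  obtain ⟨u, hu, hsub⟩ := pvFoldl_add_exists_sublist l []
  rw [PySem.Set.ofList_eq_foldl, hu]
  simpa using hsub

-- B side: run-length encoding of sorted l is the canonical value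
theorem pvB_canon (l : List String) :
    pvRunsB (PySem.List.sorted l (fun x => x) false) = pvCanon l := by
  have hpw : (PySem.List.sorted l (fun x => x) false).Pairwise (· ≤ ·) :=
    PySem.List.sorted_pairwise l (fun x => x)
  rw [pvRunsB_eq _ hpw]
  have hperm : (PySem.List.sorted l (fun x => x) false).Perm l := PySem.List.sorted_perm l _ _
  have hset : PySem.List.sorted (PySem.Set.ofList l) (fun x => x) false
      = PySem.Set.ofList (PySem.List.sorted l (fun x => x) false) := by
    apply PySem.List.sorted_eq_of_perm_of_pairwise_lt
    · apply (List.perm_ext_iff_of_nodup (PySem.Set.nodup_ofList _) (PySem.Set.nodup_ofList _)).mpr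
      intro x
      rw [PySem.Set.mem_ofList, PySem.Set.mem_ofList]
      exact ⟨fun hx => hperm.mem_iff.mp hx, fun hx => hperm.mem_iff.mpr hx⟩
    · have hle : (PySem.Set.ofList (PySem.List.sorted l (fun x => x) false)).Pairwise (· ≤ ·) :=
        hpw.sublist (pvOfList_sublist _)
      exact (hle.and (PySem.Set.nodup_ofList _)).imp (fun h => lt_of_le_of_ne h.1 h.2)
  rw [← hset]
  unfold pvCanon
  apply List.map_congr_left
  intro e _
  rw [hperm.count_eq]

-- ===== VERDICT (by name: the statement is the Claim_ definition above) =====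
theorem get_daily_filtered_spec : Claim_equal_get_daily_filtered := by
  intro data filter _hdom hpre
  unfold Spec_get_daily_filtered get_daily_filtered get_daily_filtered_alt
  dsimp only
  have h3 : ∀ r ∈ data.filter (fun row => if 2 < row.length then row.getD 2 "" != "" else false),
      r.length = 3 := by
    intro r hr
    rw [List.mem_filter] at hr
    obtain ⟨hm, hg⟩ := hr
    by_cases hl : 2 < r.length
    · rw [if_pos hl] at hg
      exact hpre r hm hl (by simpa using hg)
    · rw [if_neg hl] at hg
      exact absurd hg (by simp)
  rw [PySem.List.foldl_if_eq_foldl_filter]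
  rw [pvFoldA_eq filter _ h3]
  rw [PySem.List.foldl_append_ite (p := fun r : List String => r.getD 0 "" ∈ filter) (f := fun r => r.getD 2 "")]
  rw [PySem.Dict.foldl_insert_getD_add_one_eq_counter]
  rw [PySem.List.foldl_append_singleton_eq_self]
  simp only [List.nil_append]
  rw [pvA_canon, pvB_canon]
  rfl
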